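-- pv_equiv track=rewrite | github.com/Nghia03092004/nghia03092004.github.io | project_euler_unified/problem_811/solution.py | xor_sum
-- ===== SOURCE A (Python) =====
-- def xor_sum(N, c):
--     """Compute sum_{n=0}^{N} (n XOR c) using bitwise analysis."""
--     if N < 0:
--         return 0
--     total = 0
--     # For each bit position j, count how many n in [0..N] have bit j set in (n XOR c)
--     for j in range(61):
--         bit_c = (c >> j) & 1
--         # Count of n in [0..N] with bit j set
--         full_cycles = (N + 1) >> (j + 1)
--         remainder = (N + 1) & ((1 << (j + 1)) - 1)
--         ones_in_bit_j = full_cycles * (1 << j) + max(0, remainder - (1 << j))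
--
--         if bit_c == 1:
--             # XOR flips: ones become zeros and vice versa
--             count_set = (N + 1) - ones_in_bit_j
--         else:
--             count_set = ones_in_bit_j
--         total += count_set * (1 << j)
--     return total
-- ===== SOURCE B (Python) =====
-- def _xsum(M, c):
--     """Sum of (m ^ c) for 0 <= m < M, where 0 <= c; recursion on halving M."""
--     if M <= 0:
--         return 0
--     odd = M // 2           # number of odd m below M
--     even = M - odd         # number of even m below M
--     c2, b = c >> 1, c & 1
--     g = _xsum(odd, c2)                          # sum over m < odd of (m ^ c2)
--     g_even = g + ((odd ^ c2) if M % 2 else 0)   # sum over m < even of (m ^ c2)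
--     return 2 * (g_even + g) + even * b + odd * (1 - b)
--
--
-- def xor_sum(N, c):
--     """Sum of the low 61 bits of (n ^ c) for n in [0..N], by recursive halving."""
--     if N < 0:
--         return 0
--     return _xsum(N + 1, c & ((1 << 61) - 1))
-- ===== Notes on version B (the rewrite author's own statement) =====
-- stated objective: alternative
-- what changed: Replaces A's 61-iteration per-bit closed-form counting (cycle/remainder arithmetic with an XOR-flip branch per bit) by a recursive halving: B masks c to 61 bits once and computes sum of (m ^ c) over m < N+1 by splitting the range into even and odd m and recursing on N/2 with c >> 1.
import Mathlib
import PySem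

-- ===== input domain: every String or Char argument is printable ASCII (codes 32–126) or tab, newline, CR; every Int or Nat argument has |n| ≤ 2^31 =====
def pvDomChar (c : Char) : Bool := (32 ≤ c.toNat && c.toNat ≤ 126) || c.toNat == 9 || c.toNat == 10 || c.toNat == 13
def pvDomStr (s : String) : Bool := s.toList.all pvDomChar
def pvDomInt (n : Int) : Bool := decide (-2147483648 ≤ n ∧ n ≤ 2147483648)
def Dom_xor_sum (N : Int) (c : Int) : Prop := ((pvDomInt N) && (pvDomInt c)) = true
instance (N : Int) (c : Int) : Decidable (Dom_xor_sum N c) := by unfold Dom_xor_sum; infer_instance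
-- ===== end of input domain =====

-- B replaces A's per-bit closed-form counting loop by a recursive halving of the range
-- (mask c to 61 bits once, recurse on N//2 with c>>1); objective: alternative algorithm.

-- ===== PORT A =====
def xor_sum (N : Int) (c : Int) : Int :=
  if N < 0 then 0
  else
    (List.range 61).foldl (fun total (j : Nat) =>
      let bit_c := PySem.Int.band (c >>> j) 1
      let full_cycles := (N + 1) >>> (j + 1)
      let remainder := PySem.Int.band (N + 1) (((1:Int) <<< (j + 1)) - 1)
      let ones_in_bit_j := full_cycles * ((1:Int) <<< j) + max 0 (remainder - ((1:Int) <<< j))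
      let count_set := if bit_c = 1 then (N + 1) - ones_in_bit_j else ones_in_bit_j
      total + count_set * ((1:Int) <<< j)) 0

-- ===== PORT B =====
-- termination fact for the halving recursion (cited by `decreasing_by`)
theorem pv_half_lt (M : Int) (h : ¬ M ≤ 0) : (PySem.Int.floordiv M 2).toNat < M.toNat := by
  have := PySem.Int.floordiv_eq_ediv_of_pos (a := M) (b := 2) (by norm_num)
  omega

/-- sum of (m ^ c) for 0 <= m < M, where 0 <= c; recursion on halving M (B's `_xsum`). -/
def pv_xsum (M : Int) (c : Int) : Int :=
  if h : M ≤ 0 then 0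
  else
    let odd := PySem.Int.floordiv M 2
    let even := M - odd
    let c2 := c >>> (1 : Nat)
    let b := PySem.Int.band c 1
    let g := pv_xsum odd c2
    let g_even := g + (if PySem.Int.mod M 2 ≠ 0 then PySem.Int.bxor odd c2 else 0)
    2 * (g_even + g) + even * b + odd * (1 - b)
termination_by M.toNat
decreasing_by exact pv_half_lt M h

def xor_sum_alt (N : Int) (c : Int) : Int :=
  if N < 0 then 0
  else pv_xsum (N + 1) (PySem.Int.band c (((1:Int) <<< (61 : Nat)) - 1))

-- ===== PRECONDITION & SPEC =====
def Spec_xor_sum (N : Int) (c : Int) (out : Int) : Prop := out = xor_sum_alt N c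
instance (N : Int) (c : Int) (out : Int) : Decidable (Spec_xor_sum N c out) := by unfold Spec_xor_sum; infer_instance

-- ===== CLAIM (what is proved, stated in full; the proofs are below) =====
def Claim_equal_xor_sum : Prop := ∀ (N : Int) (c : Int), Dom_xor_sum N c → Spec_xor_sum N c (xor_sum N c)

-- ===== LEMMAS AND PROOFS =====

/-- bit j of x, as an integer in {0,1} (Python's `(x >> j) & 1`). -/
def pvBit (x : Int) (j : Nat) : Int := x / 2 ^ j % 2

/-- A's closed-form count of n in [0..M-1] with bit j set. -/
def pvOnes (j : Nat) (M : Int) : Int := M / 2 ^ (j + 1) * 2 ^ j + max 0 (M % 2 ^ (j + 1) - 2 ^ j)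

/-- A's per-bit contribution for upper bound M = N+1. -/
def pvTerm (c M : Int) (j : Nat) : Int :=
  (if pvBit c j = 1 then M - pvOnes j M else pvOnes j M) * 2 ^ j

/-- running sum of the masked xors: sum over n < t of (n ^ c) & (2^61 - 1). -/
def pvSum (c : Int) : Nat → Int
  | 0 => 0
  | t + 1 => pvSum c t + PySem.Int.band (PySem.Int.bxor (t : Int) c) (2 ^ 61 - 1)

/-- running sum of plain xors: sum over n < t of (n ^ c). -/
def pvS (c : Int) : Nat → Int
  | 0 => 0
  | t + 1 => pvS c t + PySem.Int.bxor (t : Int) c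

theorem pv_emod_char (a m q r : Int) (h : a = m * q + r) (h0 : 0 ≤ r) (h1 : r < m) :
    a % m = r := by
  subst h
  rw [add_comm, Int.add_mul_emod_self_left, Int.emod_eq_of_lt h0 h1]

theorem pv_ediv_char (a m q r : Int) (h : a = m * q + r) (h0 : 0 ≤ r) (h1 : r < m) :
    a / m = q := by
  subst h
  have hm : m ≠ 0 := by intro hm; rw [hm] at h1; omega
  rw [add_comm, Int.add_mul_ediv_left _ _ hm, Int.ediv_eq_zero_of_lt h0 h1, zero_add]

theorem pv_band_mask (x : Int) (k : Nat) : PySem.Int.band x (2 ^ k - 1) = x % 2 ^ k := by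
  have h2k : ((2 ^ k : Nat) : Int) = 2 ^ k := by push_cast; ring
  have h1le : (1 : Int) ≤ 2 ^ k := one_le_pow₀ (by norm_num)
  have hm : (0 : Int) ≤ 2 ^ k - 1 := by omega
  have htn : ((2 : Int) ^ k - 1).toNat = 2 ^ k - 1 := by omega
  unfold PySem.Int.band
  rcases le_or_gt 0 x with hx | hx
  · rw [if_pos hx, if_pos hm, htn, Nat.and_two_pow_sub_one_eq_mod]
    have : x = (x.toNat : Int) := (Int.toNat_of_nonneg hx).symm
    rw [this]
    push_cast
    rfl
  · rw [if_neg (not_le.2 hx), if_pos hm, htn]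
    set m := (-x - 1).toNat with hmdef
    have hxm : x = -((m : Int) + 1) := by
      have : ((-x - 1).toNat : Int) = -x - 1 := Int.toNat_of_nonneg (by omega)
      omega
    have hand : (2 ^ k - 1) &&& m = m % 2 ^ k := by
      rw [Nat.land_comm, Nat.and_two_pow_sub_one_eq_mod]
    rw [hand]
    have hmod : ((m : Int) % 2 ^ k) = ((m % 2 ^ k : Nat) : Int) := by push_cast; rfl
    have hb1 : 0 ≤ (m : Int) % 2 ^ k := Int.emod_nonneg _ (by positivity)
    have hb2 : (m : Int) % 2 ^ k < 2 ^ k := Int.emod_lt_of_pos _ (by positivity)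
    have hdm : 2 ^ k * ((m : Int) / 2 ^ k) + (m : Int) % 2 ^ k = m := Int.mul_ediv_add_emod _ _
    have hx2 : x % 2 ^ k = 2 ^ k - 1 - (m : Int) % 2 ^ k := by
      apply pv_emod_char x (2 ^ k) (-((m : Int) / 2 ^ k) - 1) _ _ (by omega) (by omega)
      rw [hxm]; linear_combination hdm
    rw [hx2]
    omega

theorem pv_bit_cast (a : Nat) (j : Nat) :
    pvBit (a : Int) j = if a.testBit j then 1 else 0 := by
  have h1 : pvBit (a : Int) j = ((a / 2 ^ j % 2 : Nat) : Int) := by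
    unfold pvBit; push_cast; rfl
  rw [h1, Nat.testBit_eq_decide_div_mod_eq]
  have := Nat.mod_two_eq_zero_or_one (a / 2 ^ j)
  rcases this with h | h <;> simp [h]

theorem pv_bit_negSucc (a : Nat) (j : Nat) :
    pvBit (-((a : Int) + 1)) j = 1 - pvBit (a : Int) j := by
  have hpow : (0:Int) < 2 ^ j := by positivity
  have hdm : 2 ^ j * ((a : Int) / 2 ^ j) + (a : Int) % 2 ^ j = a := Int.mul_ediv_add_emod _ _
  have hb1 : 0 ≤ (a : Int) % 2 ^ j := Int.emod_nonneg _ (by positivity)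
  have hb2 : (a : Int) % 2 ^ j < 2 ^ j := Int.emod_lt_of_pos _ hpow
  have hdiv : (-((a : Int) + 1)) / 2 ^ j = -((a : Int) / 2 ^ j) - 1 := by
    apply pv_ediv_char _ (2 ^ j) _ (2 ^ j - 1 - (a : Int) % 2 ^ j) _ (by omega) (by omega)
    linear_combination hdm
  unfold pvBit
  rw [hdiv]
  omega

theorem pv_bit_bxor (n c : Int) (hn : 0 ≤ n) (j : Nat) :
    pvBit (PySem.Int.bxor n c) j = if pvBit c j = 1 then 1 - pvBit n j else pvBit n j := by
  unfold PySem.Int.bxor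
  rw [if_pos hn]
  have hnc : ((n.toNat : Int)) = n := Int.toNat_of_nonneg hn
  rcases le_or_gt 0 c with hc | hc
  · rw [if_pos hc]
    have hcc : ((c.toNat : Int)) = c := Int.toNat_of_nonneg hc
    rw [← hnc, ← hcc, pv_bit_cast, pv_bit_cast, pv_bit_cast, Nat.testBit_xor]
    cases hb1 : n.toNat.testBit j <;> cases hb2 : c.toNat.testBit j <;> norm_num [max_eq_left hn, max_eq_left hc, hb1, hb2]
  · rw [if_neg (not_le.2 hc)]
    set u := (-c - 1).toNat with hu
    have hcu : c = -((u : Int) + 1) := by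
      have : ((-c - 1).toNat : Int) = -c - 1 := Int.toNat_of_nonneg (by omega)
      omega
    have hneg : (-((n.toNat ^^^ u : Nat) : Int) - 1 : Int) = -(((n.toNat ^^^ u : Nat) : Int) + 1) := by ring
    rw [hneg, pv_bit_negSucc, hcu, pv_bit_negSucc, ← hnc, pv_bit_cast, pv_bit_cast, pv_bit_cast, Nat.testBit_xor]
    cases hb1 : n.toNat.testBit j <;> cases hb2 : u.testBit j <;> norm_num [max_eq_left hn, hb1, hb2]

theorem pv_emod_succ (x : Int) (k : Nat) :
    x % 2 ^ (k + 1) = x % 2 ^ k + pvBit x k * 2 ^ k := by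
  have hpow : (0:Int) < 2 ^ k := by positivity
  set a := x / 2 ^ k with ha
  set r := x % 2 ^ k with hr
  have hdm : 2 ^ k * a + r = x := Int.mul_ediv_add_emod _ _
  have hb1 : 0 ≤ r := Int.emod_nonneg _ (by positivity)
  have hb2 : r < 2 ^ k := Int.emod_lt_of_pos _ hpow
  have ha2 : 2 * (a / 2) + a % 2 = a := Int.mul_ediv_add_emod _ _
  have hbit : pvBit x k = a % 2 := rfl
  have h01 : a % 2 = 0 ∨ a % 2 = 1 := Int.emod_two_eq_zero_or_one a
  have hps : (2:Int) ^ (k + 1) = 2 ^ k * 2 := pow_succ 2 k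
  have hmod : x % 2 ^ (k + 1) = a % 2 * 2 ^ k + r := by
    apply pv_emod_char _ _ (a / 2) _ _ (by rcases h01 with h | h <;> rw [h] <;> omega)
      (by rcases h01 with h | h <;> rw [h] <;> omega)
    rw [hps]; linear_combination -hdm - (2:Int) ^ k * ha2
  rw [hmod, hbit]; ring

theorem pv_bitsum (x : Int) (k : Nat) :
    x % 2 ^ k = ∑ j ∈ Finset.range k, pvBit x j * 2 ^ j := by
  induction k with
  | zero => simp
  | succ k ih => rw [pv_emod_succ, Finset.sum_range_succ, ih]

theorem pv_ones_step (j : Nat) (M : Int) :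
    pvOnes j (M + 1) = pvOnes j M + pvBit M j := by
  unfold pvOnes
  have hP : (0:Int) < 2 ^ j := by positivity
  have hps : (2:Int) ^ (j + 1) = 2 ^ j * 2 := pow_succ 2 j
  set q := M / 2 ^ (j + 1) with hq
  set r := M % 2 ^ (j + 1) with hr
  have hdm : 2 ^ (j + 1) * q + r = M := Int.mul_ediv_add_emod _ _
  have hb1 : 0 ≤ r := Int.emod_nonneg _ (by positivity)
  have hb2 : r < 2 ^ (j + 1) := Int.emod_lt_of_pos _ (by positivity)
  -- the bit of M at j is r / 2^j ∈ {0,1}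
  have hrdiv01 : r / 2 ^ j = 0 ∨ r / 2 ^ j = 1 := by
    rcases le_or_gt (2 ^ j) r with h | h
    · right
      apply pv_ediv_char _ _ _ (r - 2 ^ j) (by ring) (by omega) (by omega)
    · left; exact Int.ediv_eq_zero_of_lt hb1 h
  have hbit : pvBit M j = r / 2 ^ j := by
    have hMd : M = 2 ^ j * (2 * q) + r := by rw [← hdm, hps]; ring
    have hdivM : M / 2 ^ j = r / 2 ^ j + 2 * q := by
      have hM2 : M = r + 2 ^ j * (2 * q) := by rw [← hdm, hps]; ring
      rw [hM2, Int.add_mul_ediv_left _ _ (ne_of_gt hP)]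
    unfold pvBit
    rw [hdivM, Int.add_mul_emod_self_left]
    rcases hrdiv01 with h | h <;> rw [h] <;> decide
  have hP2 : (0:Int) < 2 ^ (j + 1) := by positivity
  rcases lt_or_eq_of_le (by omega : r + 1 ≤ 2 ^ (j + 1)) with hlt | heq
  · have hM1 : M + 1 = 2 ^ (j + 1) * q + (r + 1) := by linear_combination -hdm
    have hq1 : (M + 1) / 2 ^ (j + 1) = q := pv_ediv_char _ _ _ _ hM1 (by omega) hlt
    have hr1 : (M + 1) % 2 ^ (j + 1) = r + 1 := pv_emod_char _ _ _ _ hM1 (by omega) hlt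
    rw [hq1, hr1, hbit]
    set A := q * 2 ^ j with hA
    rcases hrdiv01 with h | h <;> rw [h]
    · have : r < 2 ^ j := by
        by_contra hcon
        have h1 := pv_ediv_char r (2 ^ j) 1 (r - 2 ^ j) (by ring) (by omega) (by omega)
        exact one_ne_zero (h1.symm.trans h)
      omega
    · have : 2 ^ j ≤ r := by
        by_contra hcon
        have h0 := Int.ediv_eq_zero_of_lt (b := 2 ^ j) hb1 (by omega)
        exact one_ne_zero (h.symm.trans h0)
      omega
  · have hM1 : M + 1 = 2 ^ (j + 1) * (q + 1) + 0 := by linear_combination -hdm + heq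
    have hq1 : (M + 1) / 2 ^ (j + 1) = q + 1 := pv_ediv_char _ _ _ _ hM1 (by omega) hP2
    have hr1 : (M + 1) % 2 ^ (j + 1) = 0 := pv_emod_char _ _ _ _ hM1 (by omega) hP2
    have hrd : r / 2 ^ j = 1 := by
      apply pv_ediv_char _ _ _ (2 ^ j - 1) (by linear_combination heq + hps) (by omega) (by omega)
    rw [hq1, hr1, hbit, hrd]
    have hqe : (q + 1) * 2 ^ j = q * 2 ^ j + 2 ^ j := by ring
    rw [hqe]
    set A := q * 2 ^ j with hA
    omega

theorem pv_foldl_range_add (F : Int → Nat → Int) (g : Nat → Int)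
    (hF : ∀ t j, F t j = t + g j) :
    ∀ (n : Nat) (a : Int),
      (List.range n).foldl F a = a + ∑ j ∈ Finset.range n, g j := by
  intro n
  induction n with
  | zero => simp
  | succ n ih =>
    intro a
    rw [List.range_succ, List.foldl_append, ih, Finset.sum_range_succ]
    simp [hF, add_assoc]

theorem pv_A_term (N c : Int) (j : Nat) :
    (let bit_c := PySem.Int.band (c >>> j) 1
     let full_cycles := (N + 1) >>> (j + 1)
     let remainder := PySem.Int.band (N + 1) (((1:Int) <<< (j + 1)) - 1)
     let ones_in_bit_j := full_cycles * ((1:Int) <<< j) + max 0 (remainder - ((1:Int) <<< j))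
     let count_set := if bit_c = 1 then (N + 1) - ones_in_bit_j else ones_in_bit_j
     count_set * ((1:Int) <<< j)) = pvTerm c (N + 1) j := by
  have hcast : ((2 ^ j : Nat) : Int) = 2 ^ j := by push_cast; ring
  have hcast1 : ((2 ^ (j + 1) : Nat) : Int) = 2 ^ (j + 1) := by push_cast; ring
  have e1 : PySem.Int.band (c >>> j) 1 = pvBit c j := by
    rw [PySem.Int.band_one, PySem.Int.mod_eq_emod_of_pos (by norm_num),
      Int.shiftRight_eq_div_pow, hcast]
    rfl
  have e2 : (N + 1) >>> (j + 1) = (N + 1) / 2 ^ (j + 1) := by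
    rw [Int.shiftRight_eq_div_pow, hcast1]
  have e3 : ((1:Int) <<< (j + 1)) = 2 ^ (j + 1) := by rw [Int.shiftLeft_eq, one_mul]
  have e4 : ((1:Int) <<< j) = 2 ^ j := by rw [Int.shiftLeft_eq, one_mul]
  simp only [e1, e2, e3, e4, pv_band_mask]
  rfl

theorem pv_A_sum (N c : Int) (h : ¬ N < 0) :
    xor_sum N c = ∑ j ∈ Finset.range 61, pvTerm c (N + 1) j := by
  rw [xor_sum, if_neg h]
  refine (pv_foldl_range_add _ (fun j => pvTerm c (N + 1) j) ?_ 61 0).trans (zero_add _)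
  intro t j
  exact congrArg (t + ·) (pv_A_term N c j)

theorem pv_bit_arith (b : Bool) (n : Nat) : Nat.bit b n = 2 * n + (if b then 1 else 0) := by
  cases b <;> simp [Nat.bit]

theorem pv_bit_decomp (c : Nat) : Nat.bit (decide (c % 2 = 1)) (c / 2) = c := by
  rcases Nat.mod_two_eq_zero_or_one c with h | h <;> simp [Nat.bit, h] <;> omega

theorem pv_nat_xor_even (m c : Nat) : (2 * m) ^^^ c = 2 * (m ^^^ (c / 2)) + c % 2 := by
  conv_lhs => rw [show 2 * m = Nat.bit false m from by simp [Nat.bit], ← pv_bit_decomp c]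
  rw [Nat.xor_bit, pv_bit_arith]
  rcases Nat.mod_two_eq_zero_or_one c with h | h <;> simp [h]

theorem pv_nat_xor_odd (m c : Nat) : (2 * m + 1) ^^^ c = 2 * (m ^^^ (c / 2)) + (1 - c % 2) := by
  conv_lhs => rw [show 2 * m + 1 = Nat.bit true m from by simp [Nat.bit], ← pv_bit_decomp c]
  rw [Nat.xor_bit, pv_bit_arith]
  rcases Nat.mod_two_eq_zero_or_one c with h | h <;> simp [h]

theorem pv_bxor_even (m c : Int) (hm : 0 ≤ m) (hc : 0 ≤ c) :
    PySem.Int.bxor (2 * m) c = 2 * PySem.Int.bxor m (c >>> (1 : Nat)) + PySem.Int.band c 1 := by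
  have hsh : c >>> (1 : Nat) = c / 2 := by
    rw [Int.shiftRight_eq_div_pow]; norm_num
  have hb1 : PySem.Int.band c 1 = c % 2 := by
    rw [PySem.Int.band_one, PySem.Int.mod_eq_emod_of_pos (by norm_num)]
  have hdiv : (0:Int) ≤ c / 2 := Int.ediv_nonneg hc (by norm_num)
  rw [hsh, hb1, PySem.Int.bxor_of_nonneg (by omega) hc, PySem.Int.bxor_of_nonneg hm hdiv]
  have h2m : (2 * m).toNat = 2 * m.toNat := by omega
  have hcd : (c / 2).toNat = c.toNat / 2 := by omega
  have hcm : c % 2 = ((c.toNat % 2 : Nat) : Int) := by omega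
  rw [h2m, hcd, hcm, pv_nat_xor_even]
  push_cast
  ring

theorem pv_bxor_odd (m c : Int) (hm : 0 ≤ m) (hc : 0 ≤ c) :
    PySem.Int.bxor (2 * m + 1) c = 2 * PySem.Int.bxor m (c >>> (1 : Nat)) + (1 - PySem.Int.band c 1) := by
  have hsh : c >>> (1 : Nat) = c / 2 := by
    rw [Int.shiftRight_eq_div_pow]; norm_num
  have hb1 : PySem.Int.band c 1 = c % 2 := by
    rw [PySem.Int.band_one, PySem.Int.mod_eq_emod_of_pos (by norm_num)]
  have hdiv : (0:Int) ≤ c / 2 := Int.ediv_nonneg hc (by norm_num)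
  rw [hsh, hb1, PySem.Int.bxor_of_nonneg (by omega) hc, PySem.Int.bxor_of_nonneg hm hdiv]
  have h2m : (2 * m + 1).toNat = 2 * m.toNat + 1 := by omega
  have hcd : (c / 2).toNat = c.toNat / 2 := by omega
  have hcm : c % 2 = ((c.toNat % 2 : Nat) : Int) := by omega
  have hle : c.toNat % 2 ≤ 1 := by omega
  rw [h2m, hcd, hcm, pv_nat_xor_odd]
  push_cast [hle]
  ring

theorem pv_pvS_even (c : Int) (hc : 0 ≤ c) (k : Nat) :
    pvS c (2 * k) = 4 * pvS (c >>> (1 : Nat)) k + k := by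
  induction k with
  | zero => simp [pvS]
  | succ k ih =>
    have h1 : 2 * (k + 1) = (2 * k + 1) + 1 := by ring
    rw [h1]
    show pvS c (2 * k + 1) + PySem.Int.bxor ((2 * k + 1 : Nat) : Int) c
        = 4 * pvS (c >>> (1 : Nat)) (k + 1) + ((k + 1 : Nat) : Int)
    show (pvS c (2 * k) + PySem.Int.bxor ((2 * k : Nat) : Int) c) + PySem.Int.bxor ((2 * k + 1 : Nat) : Int) c
        = 4 * pvS (c >>> (1 : Nat)) (k + 1) + ((k + 1 : Nat) : Int)
    have hcast : ((2 * k : Nat) : Int) = 2 * (k : Int) := by push_cast; ring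
    have hcast1 : ((2 * k + 1 : Nat) : Int) = 2 * (k : Int) + 1 := by push_cast; ring
    rw [ih, hcast, hcast1, pv_bxor_even _ _ (by positivity) hc, pv_bxor_odd _ _ (by positivity) hc]
    show _ = 4 * (pvS (c >>> (1 : Nat)) k + PySem.Int.bxor (k : Int) (c >>> (1 : Nat))) + ((k + 1 : Nat) : Int)
    push_cast
    ring

theorem pv_xsum_eq_pvS : ∀ (M : Nat) (c : Int), 0 ≤ c → pv_xsum (M : Int) c = pvS c M := by
  intro M
  induction M using Nat.strong_induction_on with
  | _ M ih =>
    intro c hc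
    match M with
    | 0 => rw [pv_xsum]; simp [pvS]
    | (M + 1) =>
      rw [pv_xsum]
      have hpos : ¬ ((M + 1 : Nat) : Int) ≤ 0 := by push_cast; omega
      rw [dif_neg hpos]
      have hfd : PySem.Int.floordiv ((M + 1 : Nat) : Int) 2 = (((M + 1) / 2 : Nat) : Int) := by
        rw [PySem.Int.floordiv_eq_ediv_of_pos (by norm_num)]
        omega
      have hdec : (M + 1) / 2 < M + 1 := by omega
      have hc2 : 0 ≤ c >>> (1 : Nat) := by
        rw [Int.shiftRight_eq_div_pow]
        exact Int.ediv_nonneg hc (by positivity)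
      have hg := ih ((M + 1) / 2) hdec (c >>> (1 : Nat)) hc2
      have hb1 : PySem.Int.band c 1 = c % 2 := by
        rw [PySem.Int.band_one, PySem.Int.mod_eq_emod_of_pos (by norm_num)]
      simp only [hfd, hg, hb1]
      set k := (M + 1) / 2 with hk
      set b := c % 2 with hbdef
      have hb01 : b = 0 ∨ b = 1 := Int.emod_two_eq_zero_or_one c
      rcases Nat.even_or_odd (M + 1) with he | ho
      · -- M + 1 = 2 * k
        have h2k : M + 1 = 2 * k := by
          rcases he with ⟨t, ht⟩; omega
        have hmod : PySem.Int.mod ((M + 1 : Nat) : Int) 2 = 0 := by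
          rw [PySem.Int.mod_eq_emod_of_pos (by norm_num)]
          omega
        rw [hmod]
        simp only [ne_eq, not_true_eq_false]
        rw [h2k, pv_pvS_even c hc k]
        have : ((2 * k : Nat) : Int) = 2 * (k : Int) := by push_cast; ring
        rw [this]
        rcases hb01 with h | h <;> rw [h] <;> push_cast <;> ring
      · -- M + 1 = 2 * k + 1
        have h2k : M + 1 = 2 * k + 1 := by
          rcases ho with ⟨t, ht⟩; omega
        have hmod : PySem.Int.mod ((M + 1 : Nat) : Int) 2 = 1 := by
          rw [PySem.Int.mod_eq_emod_of_pos (by norm_num)]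
          omega
        rw [hmod]
        rw [if_pos (by norm_num : (1:Int) ≠ 0)]
        rw [h2k]
        show _ = pvS c (2 * k) + PySem.Int.bxor ((2 * k : Nat) : Int) c
        have hcast : ((2 * k : Nat) : Int) = 2 * (k : Int) := by push_cast; ring
        rw [pv_pvS_even c hc k, hcast, pv_bxor_even _ _ (by positivity) hc, hb1]
        have : ((2 * k + 1 : Nat) : Int) = 2 * (k : Int) + 1 := by push_cast; ring
        rw [this]
        rcases hb01 with h | h <;> rw [h] <;> push_cast <;> ring

theorem pv_bit_emod (x : Int) (j k : Nat) (hjk : j < k) : pvBit (x % 2 ^ k) j = pvBit x j := by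
  obtain ⟨d, hd⟩ : ∃ d, k = j + d + 1 := ⟨k - j - 1, by omega⟩
  subst hd
  have hsplit : (2:Int) ^ (j + d + 1) = 2 ^ j * (2 * 2 ^ d) := by ring
  set q := x / 2 ^ (j + d + 1) with hq
  set r := x % 2 ^ (j + d + 1) with hr
  have hdm : 2 ^ (j + d + 1) * q + r = x := Int.mul_ediv_add_emod _ _
  have hx : x = r + 2 ^ j * (2 * (2 ^ d * q)) := by rw [← hdm]; ring
  have hdiv : x / 2 ^ j = r / 2 ^ j + 2 * (2 ^ d * q) := by
    rw [hx, Int.add_mul_ediv_left _ _ (by positivity : (2:Int) ^ j ≠ 0)]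
  unfold pvBit
  rw [hdiv, Int.add_mul_emod_self_left]

theorem pv_maskxor (n c : Int) (hn : 0 ≤ n) (hlt : n < 2 ^ 61) :
    PySem.Int.band (PySem.Int.bxor n c) (2 ^ 61 - 1)
      = PySem.Int.bxor n (PySem.Int.band c (2 ^ 61 - 1)) := by
  have hcm : PySem.Int.band c (2 ^ 61 - 1) = c % 2 ^ 61 := pv_band_mask c 61
  have hc0 : (0:Int) ≤ c % 2 ^ 61 := Int.emod_nonneg _ (by positivity)
  have hc1 : c % 2 ^ 61 < 2 ^ 61 := Int.emod_lt_of_pos _ (by positivity)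
  have hxb : 0 ≤ PySem.Int.bxor n (c % 2 ^ 61) := by
    rw [PySem.Int.bxor_of_nonneg hn hc0]; positivity
  have hxlt : PySem.Int.bxor n (c % 2 ^ 61) < 2 ^ 61 := by
    rw [PySem.Int.bxor_of_nonneg hn hc0]
    have h1 : n.toNat < 2 ^ 61 := by omega
    have h2 : (c % 2 ^ 61).toNat < 2 ^ 61 := by omega
    have := Nat.xor_lt_two_pow h1 h2
    omega
  rw [hcm, pv_band_mask, (Int.emod_eq_of_lt hxb hxlt).symm, pv_bitsum, pv_bitsum]
  apply Finset.sum_congr rfl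
  intro j hj
  have hj61 : j < 61 := Finset.mem_range.1 hj
  rw [pv_bit_bxor n c hn j, pv_bit_bxor n _ hn j, pv_bit_emod c j 61 hj61]

theorem pv_AB (c : Int) : ∀ t : Nat, (t : Int) ≤ 2 ^ 61 →
    pvSum c t = pvS (PySem.Int.band c (2 ^ 61 - 1)) t := by
  intro t
  induction t with
  | zero => intro _; rfl
  | succ t ih =>
    intro hle
    have hle' : ((t : Nat) : Int) ≤ 2 ^ 61 := by push_cast at hle ⊢; omega
    have hlt : ((t : Nat) : Int) < 2 ^ 61 := by push_cast at hle ⊢; omega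
    show pvSum c t + PySem.Int.band (PySem.Int.bxor (t : Int) c) (2 ^ 61 - 1)
        = pvS (PySem.Int.band c (2 ^ 61 - 1)) t + PySem.Int.bxor (t : Int) (PySem.Int.band c (2 ^ 61 - 1))
    rw [ih hle', pv_maskxor _ c (by positivity) hlt]

theorem pv_main (c : Int) : ∀ t : Nat, (∑ j ∈ Finset.range 61, pvTerm c (t : Int) j) = pvSum c t := by
  intro t
  induction t with
  | zero =>
    apply Finset.sum_eq_zero
    intro j _
    have hone : pvOnes j 0 = 0 := by
      unfold pvOnes
      rw [Int.zero_ediv, Int.zero_emod, zero_mul, zero_add]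
      have := pow_pos (by norm_num : (0:Int) < 2) j
      omega
    simp only [pvTerm, Nat.cast_zero, hone]
    split_ifs <;> ring
  | succ t ih =>
    have hc : ((t + 1 : Nat) : Int) = (t : Int) + 1 := by push_cast; ring
    have hstep : ∀ j ∈ Finset.range 61,
        pvTerm c ((t : Int) + 1) j = pvTerm c (t : Int) j + pvBit (PySem.Int.bxor (t : Int) c) j * 2 ^ j := by
      intro j _
      rw [pv_bit_bxor _ c (by positivity) j]
      unfold pvTerm
      rw [pv_ones_step]
      split_ifs <;> ring
    rw [hc, Finset.sum_congr rfl hstep, Finset.sum_add_distrib, ih, ← pv_bitsum,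
      ← pv_band_mask]
    rfl

-- ===== VERDICT (by name: the statement is the Claim_ definition above) =====
theorem xor_sum_spec : Claim_equal_xor_sum := by
  intro N c hdom
  show xor_sum N c = xor_sum_alt N c
  by_cases h : N < 0
  · simp [xor_sum, xor_sum_alt, h]
  · have hN : 0 ≤ N := not_lt.1 h
    have hNle : N ≤ 2147483648 := by
      have := of_decide_eq_true (by
        have hb : (pvDomInt N && pvDomInt c) = true := hdom
        exact (Bool.and_eq_true_iff.1 hb).1)
      exact this.2
    have hm : ((1:Int) <<< (61 : Nat)) - 1 = 2 ^ 61 - 1 := by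
      rw [Int.shiftLeft_eq, one_mul]
    have hc' : 0 ≤ PySem.Int.band c (2 ^ 61 - 1) := by
      rw [PySem.Int.band_comm]
      exact PySem.Int.band_nonneg_of_nonneg_left c (by positivity)
    have htn : ((N + 1).toNat : Int) = N + 1 := Int.toNat_of_nonneg (by omega)
    have hB : xor_sum_alt N c = pvS (PySem.Int.band c (2 ^ 61 - 1)) (N + 1).toNat := by
      rw [xor_sum_alt, if_neg h, hm]
      conv_lhs => rw [← htn]
      rw [pv_xsum_eq_pvS _ _ hc']
    rw [pv_A_sum N c h, hB]
    conv_lhs => rw [show (N + 1 : Int) = ((N + 1).toNat : Int) from htn.symm]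
    rw [pv_main c ((N + 1).toNat)]
    exact pv_AB c _ (by rw [htn]; omega)
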